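-- pv_equiv track=rewrite | github.com/ZIYUANLI-star/MutaKernel | src/mutengine/operators/ml_semantic.py | _first_call_arg
-- ===== SOURCE A (Python) =====
-- def _first_call_arg(inner: str) -> str:
--     depth = 0
--     start = 0
--     i = 0
--     while i < len(inner):
--         c = inner[i]
--         if c in "\"'":
--             q = c
--             i += 1
--             while i < len(inner):
--                 if inner[i] == "\\":
--                     i += 2
--                     continue
--                 if inner[i] == q:
--                     i += 1
--                     break
--                 i += 1
--             continue
--         if c == "(":
--             depth += 1
--         elif c == ")":
--             depth -= 1
--         elif c == "," and depth == 0: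
--             return inner[start:i].strip()
--         i += 1
--     return inner[start:].strip()
-- ===== SOURCE B (Python) =====
-- def _first_call_arg(inner: str) -> str:
--     # Flat single-state-machine scan: depth / active quote / escape flag, no nested loop.
--     depth = 0
--     in_quote = None
--     escape = False
--     for i, c in enumerate(inner):
--         if in_quote is not None:
--             if escape:
--                 escape = False
--             elif c == "\\":
--                 escape = True
--             elif c == in_quote:
--                 in_quote = None
--         else:
--             if c in "\"'":
--                 in_quote = c
--             elif c == "(":
--                 depth += 1
--             elif c == ")":
--                 depth -= 1
--             elif c == "," and depth == 0:
--                 return inner[:i].strip()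
--     return inner.strip()
-- ===== Notes on version B (the rewrite author's own statement) =====
-- stated objective: alternative
-- what changed: Replaced A's nested while-loop for skipping quoted sections with a single flat one-pass state machine over enumerate(inner) maintaining depth, the active quote character and an escape flag.
import Mathlib
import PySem

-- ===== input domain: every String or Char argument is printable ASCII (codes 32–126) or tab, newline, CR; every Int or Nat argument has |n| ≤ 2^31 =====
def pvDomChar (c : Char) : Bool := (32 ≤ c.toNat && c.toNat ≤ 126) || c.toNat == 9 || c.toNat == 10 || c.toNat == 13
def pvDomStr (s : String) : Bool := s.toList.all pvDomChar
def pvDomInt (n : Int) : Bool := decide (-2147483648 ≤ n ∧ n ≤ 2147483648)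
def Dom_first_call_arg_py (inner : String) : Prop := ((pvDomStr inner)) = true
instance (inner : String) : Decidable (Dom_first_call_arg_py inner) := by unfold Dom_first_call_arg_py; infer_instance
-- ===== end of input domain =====

-- ===== PORT A =====
-- B re-implements A's quote handling (nested while-loop) as a flat one-pass state machine;
-- objective: alternative decomposition, same O(n) cost.

-- A's inner quote-skipping while-loop: returns the index just after the closing quote
-- (or past the end). `aQuote_ge` below is cited by aLoop's decreasing_by.
def aQuote (cs : List Char) (q : Char) (i : Nat) : Nat :=
  if h : i < cs.length then
    if cs[i] = '\\' then aQuote cs q (i + 2)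
    else if cs[i] = q then i + 1
    else aQuote cs q (i + 1)
  else i
termination_by cs.length - i

theorem aQuote_ge (cs : List Char) (q : Char) (i : Nat) : i ≤ aQuote cs q i := by
  unfold aQuote
  split
  · split
    · exact le_trans (by omega) (aQuote_ge cs q (i + 2))
    · split
      · omega
      · exact le_trans (by omega) (aQuote_ge cs q (i + 1))
  · exact le_refl i
termination_by cs.length - i

-- A's outer while-loop.
def aLoop (cs : List Char) (depth : Int) (i : Nat) : List Char :=
  if h : i < cs.length then
    if cs[i] = '"' ∨ cs[i] = '\'' then aLoop cs depth (aQuote cs cs[i] (i + 1))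
    else if cs[i] = '(' then aLoop cs (depth + 1) (i + 1)
    else if cs[i] = ')' then aLoop cs (depth - 1) (i + 1)
    else if cs[i] = ',' ∧ depth = 0 then PySem.Chars.strip (PySem.List.slice cs (some 0) (some (i : Int)))
    else aLoop cs depth (i + 1)
  else PySem.Chars.strip (PySem.List.slice cs (some 0) none)
termination_by cs.length - i
decreasing_by
  · have := aQuote_ge cs cs[i] (i + 1); omega
  · omega
  · omega
  · omega

def first_call_arg_py (inner : String) : String :=
  String.ofList (aLoop inner.toList 0 0)

-- ===== PORT B =====
-- B's single flat loop: state = (depth, active quote or none, escape flag);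
-- `rest` is the part of `full` not yet consumed, `i` the current index.
def bLoop (full : List Char) (rest : List Char) (i : Nat) (depth : Int)
    (inQuote : Option Char) (escape : Bool) : List Char :=
  match rest with
  | [] => PySem.Chars.strip full
  | c :: rest' =>
    match inQuote with
    | some q =>
      if escape then bLoop full rest' (i + 1) depth (some q) false
      else if c = '\\' then bLoop full rest' (i + 1) depth (some q) true
      else if c = q then bLoop full rest' (i + 1) depth none false
      else bLoop full rest' (i + 1) depth (some q) false
    | none =>
      if c = '"' ∨ c = '\'' then bLoop full rest' (i + 1) depth (some c) false
      else if c = '(' then bLoop full rest' (i + 1) (depth + 1) none false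
      else if c = ')' then bLoop full rest' (i + 1) (depth - 1) none false
      else if c = ',' ∧ depth = 0 then PySem.Chars.strip (full.take i)
      else bLoop full rest' (i + 1) depth none false

def first_call_arg_py_alt (inner : String) : String :=
  String.ofList (bLoop inner.toList inner.toList 0 0 none false)

-- ===== PRECONDITION & SPEC =====
def Spec_first_call_arg_py (inner : String) (out : String) : Prop := out = first_call_arg_py_alt inner
instance (inner : String) (out : String) : Decidable (Spec_first_call_arg_py inner out) := by unfold Spec_first_call_arg_py; infer_instance

-- ===== CLAIM (what is proved, stated in full; the proofs are below) =====
def Claim_equal_first_call_arg_py : Prop := ∀ (inner : String), Dom_first_call_arg_py inner → Spec_first_call_arg_py inner (first_call_arg_py inner)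

-- ===== LEMMAS AND PROOFS =====

-- inner[0:i] is take i, inner[0:] is the whole string
theorem slice_take (cs : List Char) (i : Nat) :
    PySem.List.slice cs (some 0) (some (i : Int)) = cs.take i := by simp [pysem]

theorem slice_all (cs : List Char) : PySem.List.slice cs (some 0) none = cs := by simp [pysem]

-- B's quote phase ends exactly where A's inner while-loop says, back in the no-quote state.
theorem bLoop_quote (full : List Char) (q : Char) (depth : Int) :
    ∀ n i, full.length - i ≤ n →
      bLoop full (full.drop i) i depth (some q) false
        = bLoop full (full.drop (aQuote full q i)) (aQuote full q i) depth none false := by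
  intro n
  induction n with
  | zero =>
    intro i hi
    have hge : full.length ≤ i := by omega
    rw [List.drop_eq_nil_of_le hge,
        List.drop_eq_nil_of_le (le_trans hge (aQuote_ge full q i))]
    rfl
  | succ n ih =>
    intro i hi
    by_cases h : i < full.length
    · rw [aQuote, dif_pos h]
      by_cases hb : full[i] = '\\'
      · -- backslash: B sets the escape flag, the next char (if any) only clears it
        rw [if_pos hb, List.drop_eq_getElem_cons h]
        simp only [bLoop, Bool.false_eq_true, if_false, if_pos hb]
        by_cases h2 : i + 1 < full.length
        · rw [List.drop_eq_getElem_cons h2]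
          simp only [bLoop, if_true]
          exact ih (i + 2) (by omega)
        · rw [List.drop_eq_nil_of_le (by omega)]
          have h3 : full.length ≤ aQuote full q (i + 2) :=
            le_trans (by omega) (aQuote_ge full q (i + 2))
          rw [List.drop_eq_nil_of_le h3]
          rfl
      · by_cases hq : full[i] = q
        · rw [if_neg hb, if_pos hq, List.drop_eq_getElem_cons h]
          simp only [bLoop, Bool.false_eq_true, if_false, if_neg hb, if_pos hq]
        · rw [if_neg hb, if_neg hq, List.drop_eq_getElem_cons h]
          simp only [bLoop, Bool.false_eq_true, if_false, if_neg hb, if_neg hq]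
          exact ih (i + 1) (by omega)
    · rw [aQuote, dif_neg h, List.drop_eq_nil_of_le (by omega)]
      rfl

-- A's outer loop and B's flat loop agree from any index in the no-quote state.
theorem aLoop_eq_bLoop (full : List Char) :
    ∀ n i depth, full.length - i ≤ n →
      aLoop full depth i = bLoop full (full.drop i) i depth none false := by
  intro n
  induction n with
  | zero =>
    intro i depth hi
    have hge : full.length ≤ i := by omega
    rw [aLoop, dif_neg (by omega), List.drop_eq_nil_of_le hge, slice_all]
    rfl
  | succ n ih =>
    intro i depth hi
    rw [aLoop]
    by_cases h : i < full.length
    · rw [dif_pos h, List.drop_eq_getElem_cons h]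
      by_cases hqc : full[i] = '"' ∨ full[i] = '\''
      · simp only [bLoop, if_pos hqc]
        rw [bLoop_quote full full[i] depth full.length (i + 1) (by omega)]
        exact ih (aQuote full full[i] (i + 1)) depth
          (by have := aQuote_ge full full[i] (i + 1); omega)
      · by_cases hp : full[i] = '('
        · simp only [bLoop, if_neg hqc, if_pos hp]
          exact ih (i + 1) (depth + 1) (by omega)
        · by_cases hm : full[i] = ')'
          · simp only [bLoop, if_neg hqc, if_neg hp, if_pos hm]
            exact ih (i + 1) (depth - 1) (by omega)
          · by_cases hc : full[i] = ',' ∧ depth = 0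
            · simp only [bLoop, if_neg hqc, if_neg hp, if_neg hm, if_pos hc, slice_take]
            · simp only [bLoop, if_neg hqc, if_neg hp, if_neg hm, if_neg hc]
              exact ih (i + 1) depth (by omega)
    · rw [dif_neg h, List.drop_eq_nil_of_le (by omega), slice_all]
      rfl

-- ===== VERDICT (by name: the statement is the Claim_ definition above) =====
theorem first_call_arg_py_spec : Claim_equal_first_call_arg_py := by
  intro inner _
  unfold Spec_first_call_arg_py first_call_arg_py first_call_arg_py_alt
  rw [aLoop_eq_bLoop inner.toList inner.toList.length 0 0 (by omega)]
  rfl
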